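-- pv_equiv track=rewrite | github.com/lucas-xu51/DAIL_SQL_Server | create_masked_cache.py | mask_question_with_schema_linking_data
-- ===== SOURCE A (Python) =====
-- def mask_question_with_schema_linking_data(question_tokens, sc_link, cv_link, mask_tag="<mask>", value_tag="<unk>"):
--     """
--     Apply mask processing to question tokens using schema linking information
--
--     Args:
--         question_tokens: List of question tokens
--         sc_link: Schema linking data (q_col_match, q_tab_match)
--         cv_link: Column value linking data (num_date_match, cell_match)
--         mask_tag: Token for schema elements (columns/tables)
--         value_tag: Token for values (numbers/cells)
--
--     Returns:
--         str: Masked question string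
--     """
--     def mask_tokens(tokens, mask_ids, tag):
--         """Replace tokens at specified positions with tag"""
--         new_tokens = []
--         for idx, token in enumerate(tokens):
--             if idx in mask_ids:
--                 new_tokens.append(tag)
--             else:
--                 new_tokens.append(token)
--         return new_tokens
--
--     # Extract value match positions (numbers, dates, cells)
--     num_date_match_ids = []
--     if 'num_date_match' in cv_link:
--         num_date_match_ids = [int(match.split(',')[0]) for match in cv_link['num_date_match']]
--
--     cell_match_ids = []
--     if 'cell_match' in cv_link:
--         cell_match_ids = [int(match.split(',')[0]) for match in cv_link['cell_match']]
--
--     value_match_q_ids = num_date_match_ids + cell_match_ids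
--
--     # Apply value masking first
--     masked_tokens = mask_tokens(question_tokens, value_match_q_ids, value_tag)
--
--     # Extract schema match positions (columns, tables)
--     q_col_match_ids = []
--     if 'q_col_match' in sc_link:
--         q_col_match_ids = [int(match.split(',')[0]) for match in sc_link['q_col_match']]
--
--     q_tab_match_ids = []
--     if 'q_tab_match' in sc_link:
--         q_tab_match_ids = [int(match.split(',')[0]) for match in sc_link['q_tab_match']]
--
--     schema_match_q_ids = q_col_match_ids + q_tab_match_ids
--
--     # Apply schema masking
--     masked_tokens = mask_tokens(masked_tokens, schema_match_q_ids, mask_tag)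
--
--     return " ".join(masked_tokens)
-- ===== SOURCE B (Python) =====
-- def mask_question_with_schema_linking_data(question_tokens, sc_link, cv_link, mask_tag="<mask>", value_tag="<unk>"):
--     def link_ids(link, keys):
--         ids = set()
--         for key in keys:
--             if key in link:
--                 for match in link[key]:
--                     ids.add(int(match.split(',')[0]))
--         return ids
--
--     schema_ids = link_ids(sc_link, ('q_col_match', 'q_tab_match'))
--     value_ids = link_ids(cv_link, ('num_date_match', 'cell_match'))
--     masked = [mask_tag if idx in schema_ids
--               else value_tag if idx in value_ids
--               else token
--               for idx, token in enumerate(question_tokens)]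
--     return " ".join(masked)
-- ===== Notes on version B (the rewrite author's own statement) =====
-- stated objective: simpler
-- what changed: B builds two position sets once and produces the output in a single pass over enumerate(question_tokens) with schema-before-value precedence, instead of A's two sequential full rebuilds of the token list each scanning an id list per token.
import Mathlib
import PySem

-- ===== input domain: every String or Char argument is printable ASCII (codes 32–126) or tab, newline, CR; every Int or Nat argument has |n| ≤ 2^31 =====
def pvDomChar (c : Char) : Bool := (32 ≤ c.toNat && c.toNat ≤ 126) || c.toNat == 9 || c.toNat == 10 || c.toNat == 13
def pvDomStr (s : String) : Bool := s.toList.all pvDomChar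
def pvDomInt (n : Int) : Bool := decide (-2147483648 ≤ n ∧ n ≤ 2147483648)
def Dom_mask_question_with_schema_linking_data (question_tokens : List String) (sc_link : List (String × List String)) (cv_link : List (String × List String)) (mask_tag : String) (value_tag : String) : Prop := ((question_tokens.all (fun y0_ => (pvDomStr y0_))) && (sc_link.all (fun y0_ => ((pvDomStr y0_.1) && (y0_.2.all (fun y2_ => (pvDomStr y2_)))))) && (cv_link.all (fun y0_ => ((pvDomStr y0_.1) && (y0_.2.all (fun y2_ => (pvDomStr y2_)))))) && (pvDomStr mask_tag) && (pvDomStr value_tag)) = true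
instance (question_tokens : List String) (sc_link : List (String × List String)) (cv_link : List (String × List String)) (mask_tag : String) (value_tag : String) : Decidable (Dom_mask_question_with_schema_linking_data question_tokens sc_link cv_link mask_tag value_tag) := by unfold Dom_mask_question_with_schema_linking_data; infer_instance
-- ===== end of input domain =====

-- B replaces A's two sequential full rebuilds of the token list (each scanning an id list per
-- token) by two position sets built once and ONE pass over enumerate(question_tokens), testing
-- schema before value membership; return value only, no argument is mutated.

-- ===== PORT A =====
-- int(match.split(',')[0]); Python raises ValueError where ofStr? is none — excluded by Pre_
def pvMatchId (m : String) : Int :=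
  (PySem.Int.ofStr? (((PySem.Str.split? m ",").getD []).headD "")).getD 0

-- "if key in link: [int(match.split(',')[0]) for match in link[key]]" (else the [] default)
def pvIdsOf (link : List (String × List String)) (key : String) : List Int :=
  match PySem.Dict.get? (PySem.Dict.mk link) key with
  | some ms => ms.map pvMatchId
  | none => []

-- A's inner helper mask_tokens: rebuilds the whole token list, scanning mask_ids per token
def pvMaskTokens (tokens : List String) (maskIds : List Int) (tag : String) : List String :=
  (PySem.List.enumerate tokens).foldl
    (fun acc p => if p.1 ∈ maskIds then acc ++ [tag] else acc ++ [p.2]) []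

def mask_question_with_schema_linking_data (question_tokens : List String) (sc_link : List (String × List String)) (cv_link : List (String × List String)) (mask_tag : String) (value_tag : String) : String :=
  let num_date_match_ids := pvIdsOf cv_link "num_date_match"
  let cell_match_ids := pvIdsOf cv_link "cell_match"
  let value_match_q_ids := num_date_match_ids ++ cell_match_ids
  let masked_tokens := pvMaskTokens question_tokens value_match_q_ids value_tag
  let q_col_match_ids := pvIdsOf sc_link "q_col_match"
  let q_tab_match_ids := pvIdsOf sc_link "q_tab_match"
  let schema_match_q_ids := q_col_match_ids ++ q_tab_match_ids
  let masked_tokens2 := pvMaskTokens masked_tokens schema_match_q_ids mask_tag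
  PySem.Str.join " " masked_tokens2

-- ===== PORT B =====
-- B's link_ids: one set accumulating int(match.split(',')[0]) over the present keys
def pvLinkIds (link : List (String × List String)) (keys : List String) : PySem.Set Int :=
  keys.foldl
    (fun ids key =>
      match PySem.Dict.get? (PySem.Dict.mk link) key with
      | some ms => ms.foldl (fun s m => PySem.Set.add s (pvMatchId m)) ids
      | none => ids)
    PySem.Set.empty

def mask_question_with_schema_linking_data_alt (question_tokens : List String) (sc_link : List (String × List String)) (cv_link : List (String × List String)) (mask_tag : String) (value_tag : String) : String :=
  let schema_ids := pvLinkIds sc_link ["q_col_match", "q_tab_match"]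
  let value_ids := pvLinkIds cv_link ["num_date_match", "cell_match"]
  PySem.Str.join " "
    ((PySem.List.enumerate question_tokens).map
      (fun p =>
        if PySem.Set.contains schema_ids p.1 then mask_tag
        else if PySem.Set.contains value_ids p.1 then value_tag
        else p.2))

-- ===== PRECONDITION & SPEC =====
-- every match string under a present relevant key must parse as int() — A raises ValueError otherwise
def pvParseOk (link : List (String × List String)) (key : String) : Bool :=
  ((PySem.Dict.get? (PySem.Dict.mk link) key).getD []).all
    (fun m => (PySem.Int.ofStr? (((PySem.Str.split? m ",").getD []).headD "")).isSome)

def Pre_mask_question_with_schema_linking_data (question_tokens : List String) (sc_link : List (String × List String)) (cv_link : List (String × List String)) (mask_tag : String) (value_tag : String) : Prop :=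
  pvParseOk cv_link "num_date_match" = true ∧ pvParseOk cv_link "cell_match" = true ∧
  pvParseOk sc_link "q_col_match" = true ∧ pvParseOk sc_link "q_tab_match" = true
instance (question_tokens : List String) (sc_link : List (String × List String)) (cv_link : List (String × List String)) (mask_tag : String) (value_tag : String) : Decidable (Pre_mask_question_with_schema_linking_data question_tokens sc_link cv_link mask_tag value_tag) := by unfold Pre_mask_question_with_schema_linking_data; infer_instance

def pvWitness_mask_question_with_schema_linking_data : List String × (List (String × List String)) × (List (String × List String)) × String × String :=
  (["who", "is", "bob"], [("q_col_match", ["0,1"])], [("cell_match", ["2,0"])], "<mask>", "<unk>")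

def Spec_mask_question_with_schema_linking_data (question_tokens : List String) (sc_link : List (String × List String)) (cv_link : List (String × List String)) (mask_tag : String) (value_tag : String) (out : String) : Prop := out = mask_question_with_schema_linking_data_alt question_tokens sc_link cv_link mask_tag value_tag
instance (question_tokens : List String) (sc_link : List (String × List String)) (cv_link : List (String × List String)) (mask_tag : String) (value_tag : String) (out : String) : Decidable (Spec_mask_question_with_schema_linking_data question_tokens sc_link cv_link mask_tag value_tag out) := by unfold Spec_mask_question_with_schema_linking_data; infer_instance

-- ===== CLAIM (what is proved, stated in full; the proofs are below) =====
def Claim_equal_mask_question_with_schema_linking_data : Prop := ∀ (question_tokens : List String) (sc_link : List (String × List String)) (cv_link : List (String × List String)) (mask_tag : String) (value_tag : String), Dom_mask_question_with_schema_linking_data question_tokens sc_link cv_link mask_tag value_tag → Pre_mask_question_with_schema_linking_data question_tokens sc_link cv_link mask_tag value_tag → Spec_mask_question_with_schema_linking_data question_tokens sc_link cv_link mask_tag value_tag (mask_question_with_schema_linking_data question_tokens sc_link cv_link mask_tag value_tag)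

-- ===== LEMMAS AND PROOFS =====

-- A's mask_tokens is a map over enumerate
theorem pvMaskTokens_eq_map (tokens : List String) (maskIds : List Int) (tag : String) :
    pvMaskTokens tokens maskIds tag =
      (PySem.List.enumerate tokens).map (fun p => if p.1 ∈ maskIds then tag else p.2) := by
  unfold pvMaskTokens
  have h : (fun (acc : List String) (p : Int × String) =>
      if p.1 ∈ maskIds then acc ++ [tag] else acc ++ [p.2]) =
      (fun acc p => acc ++ [if p.1 ∈ maskIds then tag else p.2]) := by
    funext acc p; split_ifs <;> rfl
  rw [h, PySem.List.foldl_append_singleton_eq_map, List.nil_append]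

-- enumerating a per-index relabelling of an enumerated list keeps the indices aligned
theorem enumerate_map_enumerate (tokens : List String) (g : Int × String → String) (s : Int) :
    PySem.List.enumerate ((PySem.List.enumerate tokens s).map g) s =
      (PySem.List.enumerate tokens s).map (fun p => (p.1, g p)) := by
  induction tokens generalizing s with
  | nil => rfl
  | cons x xs ih =>
      simp [PySem.List.enumerate_cons, ih (s + 1)]

-- membership in B's two-key set is membership in A's concatenated id lists
theorem mem_pvLinkIds (link : List (String × List String)) (k1 k2 : String) (x : Int) :
    x ∈ pvLinkIds link [k1, k2] ↔ x ∈ pvIdsOf link k1 ++ pvIdsOf link k2 := by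
  have step : ∀ (ids : PySem.Set Int) (key : String),
      (match PySem.Dict.get? (PySem.Dict.mk link) key with
        | some ms => ms.foldl (fun s m => PySem.Set.add s (pvMatchId m)) ids
        | none => ids) = PySem.Set.update ids (pvIdsOf link key) := by
    intro ids key
    unfold pvIdsOf
    cases PySem.Dict.get? (PySem.Dict.mk link) key with
    | some ms => simp [PySem.Set.update_map_eq_foldl_add]
    | none => rfl
  show x ∈ [k1, k2].foldl _ PySem.Set.empty ↔ _
  simp only [List.foldl_cons, List.foldl_nil, step]
  simp [PySem.Set.mem_update, PySem.Set.empty, List.mem_append]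

-- ===== VERDICT (by name: the statement is the Claim_ definition above) =====
theorem mask_question_with_schema_linking_data_spec : Claim_equal_mask_question_with_schema_linking_data := by
  intro question_tokens sc_link cv_link mask_tag value_tag _ _
  show mask_question_with_schema_linking_data _ _ _ _ _ = _
  unfold mask_question_with_schema_linking_data mask_question_with_schema_linking_data_alt
  simp only [pvMaskTokens_eq_map, enumerate_map_enumerate, List.map_map]
  congr 1
  apply List.map_congr_left
  intro p _
  simp only [Function.comp]
  by_cases hs : p.1 ∈ pvIdsOf sc_link "q_col_match" ++ pvIdsOf sc_link "q_tab_match"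
  · simp [mem_pvLinkIds, hs]
  · by_cases hv : p.1 ∈ pvIdsOf cv_link "num_date_match" ++ pvIdsOf cv_link "cell_match"
    · simp [mem_pvLinkIds, hs, hv]
    · simp [mem_pvLinkIds, hs, hv]
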